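-- pv_equiv track=rewrite | github.com/megascienta/sciona | src/sciona/code_analysis/diagnostics/pre_persist/pipeline.py | _repo_hint_overlap
-- ===== SOURCE A (Python) =====
-- from typing import Sequence
--
-- def _repo_hint_overlap(
--     candidate_module_hints: Sequence[str],
--     repo_module_prefixes: set[str],
-- ) -> tuple[str, ...]:
--     matches: set[str] = set()
--     for hint in candidate_module_hints:
--         hint_str = str(hint).strip()
--         if not hint_str:
--             continue
--         for idx in range(1, len(hint_str.split(".")) + 1):
--             prefix = ".".join(hint_str.split(".")[:idx])
--             if prefix in repo_module_prefixes:
--                 matches.add(hint_str)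
--                 break
--     return tuple(sorted(matches))
-- ===== SOURCE B (Python) =====
-- def _repo_hint_overlap(candidate_module_hints, repo_module_prefixes):
--     # Instead of enumerating every dotted prefix of each hint (split + join per index),
--     # scan the repo prefixes and test each one directly against the hint with a
--     # segment-boundary check: p matches h iff h startswith p and the match ends at
--     # the end of h or exactly at a dot.
--     matches = set()
--     for hint in candidate_module_hints:
--         h = str(hint).strip()
--         if not h:
--             continue
--         if any(h.startswith(p) and (len(p) == len(h) or h[len(p)] == ".")
--                for p in repo_module_prefixes):
--             matches.add(h)
--     return tuple(sorted(matches))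
-- ===== Notes on version B (the rewrite author's own statement) =====
-- stated objective: alternative
-- what changed: B drops A's prefix enumeration entirely: instead of splitting each hint and testing every dotted prefix for set membership, B scans the repo prefixes and checks each one against the hint with a single startswith-plus-segment-boundary test (match ends at end of hint or at a dot); it trades A's O(k^2) per-hint prefix construction for an O(R) scan over the repo prefixes, so it is slower when the repo prefix set is large.
import Mathlib
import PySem

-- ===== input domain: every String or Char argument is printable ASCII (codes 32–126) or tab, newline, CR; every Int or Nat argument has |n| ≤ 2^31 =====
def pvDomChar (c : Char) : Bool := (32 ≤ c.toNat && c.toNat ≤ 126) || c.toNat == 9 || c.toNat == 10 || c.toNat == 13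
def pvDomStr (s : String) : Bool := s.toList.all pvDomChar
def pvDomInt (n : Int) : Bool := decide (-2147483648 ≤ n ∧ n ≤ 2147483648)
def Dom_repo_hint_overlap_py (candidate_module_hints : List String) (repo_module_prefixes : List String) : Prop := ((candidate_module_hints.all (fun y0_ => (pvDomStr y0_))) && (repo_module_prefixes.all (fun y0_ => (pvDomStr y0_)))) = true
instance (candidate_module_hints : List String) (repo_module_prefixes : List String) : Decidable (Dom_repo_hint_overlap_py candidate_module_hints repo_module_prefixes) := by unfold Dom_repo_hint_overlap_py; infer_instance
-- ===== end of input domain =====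

-- B drops A's prefix enumeration (split each hint and test every dotted prefix): it scans the repo
-- prefixes instead and tests each against the hint with one startswith-plus-segment-boundary check
-- (objective: alternative algorithm).

-- ===== PORT A =====
-- inner 'for idx in range(…): prefix = ".".join(parts[:idx]); if prefix in repo: … break' — returns whether the break fired
def aInner (parts repo : List String) : List Int → Bool
  | [] => false
  | idx :: rest =>
    if repo.contains (PySem.Str.join "." (PySem.List.slice parts none (some idx))) then true
    else aInner parts repo rest

def repo_hint_overlap_py (candidate_module_hints : List String) (repo_module_prefixes : List String) : List String :=
  let matched : PySem.Set String :=
    candidate_module_hints.foldl (fun acc hint =>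
      let hint_str := PySem.Str.strip hint
      if hint_str = "" then acc
      else
        -- hint_str.split("."): sep "." ≠ "" so split? is always some (exact)
        let parts := (PySem.Str.split? hint_str ".").getD []
        if aInner parts repo_module_prefixes (PySem.List.pyRange 1 ((parts.length : Int) + 1) 1) then
          PySem.Set.add acc hint_str
        else acc) PySem.Set.empty
  PySem.List.sorted matched (fun x => x) false

-- ===== PORT B =====
-- 'h.startswith(p) and (len(p) == len(h) or h[len(p)] == ".")' — p matches h at a segment boundary
def bBoundary (h p : String) : Bool :=
  PySem.Str.startswith h p &&
    (PySem.Str.len p == PySem.Str.len h || PySem.Str.pyGet? h (PySem.Str.len p) == some '.')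

def repo_hint_overlap_py_alt (candidate_module_hints : List String) (repo_module_prefixes : List String) : List String :=
  let matched : PySem.Set String :=
    candidate_module_hints.foldl (fun acc hint =>
      let h := PySem.Str.strip hint
      if h = "" then acc
      else if repo_module_prefixes.any (fun p => bBoundary h p) then PySem.Set.add acc h
      else acc) PySem.Set.empty
  PySem.List.sorted matched (fun x => x) false

-- ===== PRECONDITION & SPEC =====
def Spec_repo_hint_overlap_py (candidate_module_hints : List String) (repo_module_prefixes : List String) (out : List String) : Prop := out = repo_hint_overlap_py_alt candidate_module_hints repo_module_prefixes
instance (candidate_module_hints : List String) (repo_module_prefixes : List String) (out : List String) : Decidable (Spec_repo_hint_overlap_py candidate_module_hints repo_module_prefixes out) := by unfold Spec_repo_hint_overlap_py; infer_instance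

-- ===== CLAIM (what is proved, stated in full; the proofs are below) =====
def Claim_equal_repo_hint_overlap_py : Prop := ∀ (candidate_module_hints : List String) (repo_module_prefixes : List String), Dom_repo_hint_overlap_py candidate_module_hints repo_module_prefixes → Spec_repo_hint_overlap_py candidate_module_hints repo_module_prefixes (repo_hint_overlap_py candidate_module_hints repo_module_prefixes)

-- ===== LEMMAS AND PROOFS =====

-- A's inner break-loop is an `any` over the index list
theorem aInner_eq_any (parts repo : List String) (idxs : List Int) :
    aInner parts repo idxs
      = idxs.any (fun idx => repo.contains (PySem.Str.join "." (PySem.List.slice parts none (some idx)))) := by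
  induction idxs with
  | nil => rfl
  | cons i rest ih => simp [aInner, ih]

-- PySem's fuel-based splitOn on sep = ['.'] is Mathlib's List.splitOn '.'
theorem splitOn_go_spec (fuel : Nat) : ∀ (l cur : List Char) (acc : List (List Char)),
    l.length < fuel →
    PySem.Chars.splitOn.go ['.'] fuel l cur acc
      = acc.reverse ++ (l.splitOn '.').modifyHead (fun x => cur.reverse ++ x) := by
  induction fuel with
  | zero => intro l cur acc h; omega
  | succ n ih =>
    intro l cur acc h
    cases l with
    | nil =>
      simp [PySem.Chars.splitOn.go, List.splitOn]
    | cons c rest =>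
      by_cases hc : c = '.'
      · subst hc
        have hpref : List.isPrefixOf ['.'] ('.' :: rest) = true := by
          simp [List.isPrefixOf]
        rw [PySem.Chars.splitOn.go]
        simp only [hpref, if_true, List.length_singleton, List.drop_one, List.tail_cons]
        rw [ih rest [] (List.reverse cur :: acc) (by simp at h ⊢; omega)]
        obtain ⟨h0, t0, ht⟩ := List.exists_cons_of_ne_nil (List.splitOnP_ne_nil (· == '.') rest)
        show _ = acc.reverse ++ (List.splitOnP (· == '.') ('.' :: rest)).modifyHead _
        rw [List.splitOnP_cons]
        simp [List.splitOn, ht]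
      · have hpref : List.isPrefixOf ['.'] (c :: rest) = false := by
          simp [List.isPrefixOf]; intro hcc; exact absurd hcc.symm hc
        rw [PySem.Chars.splitOn.go]
        simp only [hpref, Bool.false_eq_true, if_false]
        rw [ih rest (c :: cur) acc (by simp at h ⊢; omega)]
        obtain ⟨h0, t0, ht⟩ := List.exists_cons_of_ne_nil (List.splitOnP_ne_nil (· == '.') rest)
        show _ = acc.reverse ++ (List.splitOnP (· == '.') (c :: rest)).modifyHead _
        rw [List.splitOnP_cons]
        have hcb : ((c == '.') : Bool) = false := by simp [hc]
        simp [List.splitOn, ht, hcb]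

theorem chars_splitOn_eq (l : List Char) :
    PySem.Chars.splitOn l ['.'] = l.splitOn '.' := by
  show PySem.Chars.splitOn.go ['.'] (l.length + 1) l [] [] = _
  rw [splitOn_go_spec (l.length + 1) l [] [] (by omega)]
  obtain ⟨h0, t0, ht⟩ := List.exists_cons_of_ne_nil (List.splitOnP_ne_nil (· == '.') l)
  show [].reverse ++ (List.splitOnP (· == '.') l).modifyHead _ = List.splitOnP (· == '.') l
  simp [ht]

-- no chunk of splitOn '.' contains '.'
theorem splitOn_no_dot : ∀ (l : List Char), ∀ part ∈ l.splitOn '.', ('.' : Char) ∉ part := by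
  intro l
  induction l with
  | nil =>
    intro part hp
    rw [show List.splitOn '.' ([] : List Char) = [[]] from rfl] at hp
    simp at hp; simp [hp]
  | cons c rest ih =>
    intro part hp
    rw [show List.splitOn '.' (c :: rest) = List.splitOnP (· == '.') (c :: rest) from rfl,
        List.splitOnP_cons] at hp
    by_cases hc : c = '.'
    · simp only [hc, beq_self_eq_true, if_true, List.mem_cons] at hp
      rcases hp with hp | hp
      · simp [hp]
      · exact ih part hp
    · have hcb : ((c == '.') : Bool) = false := by simp [hc]
      obtain ⟨h0, t0, ht⟩ := List.exists_cons_of_ne_nil (List.splitOnP_ne_nil (· == '.') rest)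
      rw [hcb] at hp
      simp only [Bool.false_eq_true, if_false, ht, List.modifyHead_cons, List.mem_cons] at hp
      have hmemrest : ∀ x ∈ h0 :: t0, ('.' : Char) ∉ x := by
        intro x hx
        exact ih x (by rw [show List.splitOn '.' rest = List.splitOnP (· == '.') rest from rfl, ht]; exact hx)
      rcases hp with hp | hp
      · subst hp
        intro hmem
        rcases List.mem_cons.mp hmem with h' | h'
        · exact hc h'.symm
        · exact hmemrest h0 List.mem_cons_self h'
      · exact hmemrest part (List.mem_cons_of_mem _ hp)

theorem intercalate_cons_cons (a b : List Char) (l : List (List Char)) :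
    ['.'].intercalate (a :: b :: l) = a ++ '.' :: ['.'].intercalate (b :: l) := by
  simp [List.intercalate]

-- boundary prefixes of ['.'].intercalate S are exactly the joins of its nonempty initial chunks
theorem keyChars : ∀ (S : List (List Char)), S ≠ [] → (∀ l ∈ S, ('.' : Char) ∉ l) →
    ∀ (q : List Char),
    (∃ k < S.length, q = ['.'].intercalate (S.take (k+1))) ↔
      (q <+: ['.'].intercalate S ∧
        (q.length = (['.'].intercalate S).length ∨ (['.'].intercalate S)[q.length]? = some '.')) := by
  intro S
  induction S with
  | nil => intro h; exact absurd rfl h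
  | cons a S' ih =>
    intro _ hnd q
    cases S' with
    | nil =>
      have hH : ['.'].intercalate [a] = a := by simp [List.intercalate]
      constructor
      · rintro ⟨k, hk, rfl⟩
        have hk0 : k = 0 := by simpa using hk
        subst hk0
        simp [List.intercalate]
      · rintro ⟨hpre, hb⟩
        rw [hH] at hpre hb
        rcases hb with hlen | hdot
        · have hqa : q = a := hpre.eq_of_length hlen
          exact ⟨0, by simp, by simp [List.intercalate, hqa]⟩
        · exact absurd (List.mem_of_getElem? hdot) (hnd a List.mem_cons_self)
    | cons b rest =>
      set T := ['.'].intercalate (b :: rest) with hT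
      have hH : ['.'].intercalate (a :: b :: rest) = a ++ '.' :: T := intercalate_cons_cons a b rest
      have hndT : ∀ l ∈ b :: rest, ('.' : Char) ∉ l := fun l hl => hnd l (List.mem_cons_of_mem _ hl)
      have ihT := ih (by simp) hndT
      constructor
      · rintro ⟨k, hk, rfl⟩
        cases k with
        | zero =>
          have hq : ['.'].intercalate ((a :: b :: rest).take 1) = a := by simp [List.intercalate]
          rw [hq, hH]
          refine ⟨List.prefix_append _ _, Or.inr ?_⟩
          rw [List.getElem?_append_right (le_refl a.length)]
          simp
        | succ k' =>
          have htake : (a :: b :: rest).take (k' + 2) = a :: (b :: rest).take (k' + 1) := by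
            simp [List.take_succ_cons]
          set q' := ['.'].intercalate ((b :: rest).take (k' + 1)) with hq'
          have hqeq : ['.'].intercalate ((a :: b :: rest).take (k' + 1 + 1)) = a ++ '.' :: q' := by
            rw [htake]
            obtain ⟨hd, tl, htl⟩ : ∃ hd tl, (b :: rest).take (k' + 1) = hd :: tl :=
              ⟨b, rest.take k', by simp [List.take_succ_cons]⟩
            rw [hq', htl]; exact intercalate_cons_cons a hd tl
          have hk' : k' < (b :: rest).length := by simpa using hk
          have hb' := (ihT q').mp ⟨k', hk', rfl⟩
          obtain ⟨hpre', hbd'⟩ := hb'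
          rw [hqeq, hH]
          constructor
          · exact List.prefix_append_right_inj a |>.mpr (List.cons_prefix_cons.mpr ⟨rfl, hpre'⟩)
          · have hlq : (a ++ '.' :: q').length = a.length + 1 + q'.length := by simp only [List.length_append, List.length_cons]; omega
            rcases hbd' with hlen | hdot
            · left
              simp only [List.length_append, List.length_cons]
              omega
            · right
              rw [List.getElem?_append_right (by simp only [List.length_append, List.length_cons]; omega)]
              have : (a ++ '.' :: q').length - a.length = q'.length + 1 := by
                simp only [List.length_append, List.length_cons]; omega
              rw [this]
              simpa using hdot
      · rintro ⟨hpre, hb⟩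
        rw [hH] at hpre hb
        rcases lt_trichotomy q.length a.length with hlt | heq | hgt
        · exfalso
          rcases hb with hlen | hdot
          · simp only [List.length_append, List.length_cons] at hlen; omega
          · rw [List.getElem?_append_left hlt] at hdot
            exact absurd (List.mem_of_getElem? hdot) (hnd a List.mem_cons_self)
        · have hqa : q = a :=
            (List.prefix_of_prefix_length_le hpre (List.prefix_append _ _) (by omega)).eq_of_length heq
          exact ⟨0, by simp, by simp [List.intercalate, hqa]⟩
        · -- a.length < q.length : q = a ++ '.' :: T.take m with m := q.length - a.length - 1
          have hql : q.length ≤ a.length + 1 + T.length := by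
            have := hpre.length_le
            simp only [List.length_append, List.length_cons] at this
            omega
          set m := q.length - a.length - 1 with hm
          have hmT : m ≤ T.length := by omega
          have hqtake : q = a ++ '.' :: T.take m := by
            have h1 : q = (a ++ '.' :: T).take q.length := List.prefix_iff_eq_take.mp hpre
            rw [h1, List.take_append, List.take_of_length_le (by omega)]
            congr 1
            have h2 : q.length - a.length = m + 1 := by omega
            rw [h2, List.take_succ_cons]
          set q' := T.take m with hq'
          have hq'len : q'.length = m := by simp [hq', hmT]
          have hbd' : q' <+: T ∧ (q'.length = T.length ∨ T[q'.length]? = some '.') := by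
            refine ⟨List.take_prefix m T, ?_⟩
            rcases hb with hlen | hdot
            · left
              simp only [List.length_append, List.length_cons] at hlen
              omega
            · right
              rw [List.getElem?_append_right (by omega)] at hdot
              have h3 : q.length - a.length = m + 1 := by omega
              rw [h3] at hdot
              simpa [hq'len] using hdot
          obtain ⟨k, hk, hkq⟩ := (ihT q').mpr hbd'
          refine ⟨k + 1, by simpa using hk, ?_⟩
          have htake : (a :: b :: rest).take (k + 1 + 1) = a :: (b :: rest).take (k + 1) := by
            simp [List.take_succ_cons]
          rw [htake]
          obtain ⟨hd, tl, htl⟩ : ∃ hd tl, (b :: rest).take (k + 1) = hd :: tl :=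
            ⟨b, rest.take k, by simp [List.take_succ_cons]⟩
          rw [htl, intercalate_cons_cons a hd tl, ← htl, ← hkq, hqtake]

-- B's boundary test, read off on character lists
theorem boundary_iff (h p : String) :
    bBoundary h p = true ↔
      (p.toList <+: h.toList ∧
        (p.toList.length = h.toList.length ∨ h.toList[p.toList.length]? = some '.')) := by
  unfold bBoundary
  rw [Bool.and_eq_true, Bool.or_eq_true, PySem.Str.startswith_eq, PySem.Chars.startswith_iff]
  have hlen : (PySem.Str.len p == PySem.Str.len h) = true ↔ p.toList.length = h.toList.length := by
    rw [beq_iff_eq]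
    unfold PySem.Str.len
    exact Int.natCast_inj
  have hget : (PySem.Str.pyGet? h (PySem.Str.len p) == some '.') = true
      ↔ h.toList[p.toList.length]? = some '.' := by
    rw [beq_iff_eq, show PySem.Str.len p = ((p.toList.length : Nat) : Int) from rfl,
        PySem.Str.pyGet?_natCast]
  rw [hlen, hget]

-- A's split of h, as Mathlib's splitOn
theorem parts_eq (h : String) :
    (PySem.Str.split? h ".").getD [] = (h.toList.splitOn '.').map String.ofList := by
  show (Option.map _ (PySem.Chars.split? h.toList ".".toList)).getD [] = _
  have hsep : ".".toList = ['.'] := rfl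
  rw [hsep]
  show (Option.map _ (if (['.'] : List Char).isEmpty then none
        else some (PySem.Chars.splitOn h.toList ['.']))).getD [] = _
  simp [chars_splitOn_eq]

-- A's break-scan over the prefixes equals ∃ initial chunk whose join is in repo
theorem acond_iff (parts repo : List String) :
    aInner parts repo (PySem.List.pyRange 1 ((parts.length : Int) + 1) 1) = true ↔
      ∃ k < parts.length, PySem.Str.join "." (parts.take (k+1)) ∈ repo := by
  rw [aInner_eq_any]
  simp only [List.any_eq_true, List.contains_iff_mem]
  constructor
  · rintro ⟨idx, hidx, hmem⟩
    rw [PySem.List.mem_pyRange_one] at hidx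
    refine ⟨idx.toNat - 1, by omega, ?_⟩
    rwa [show idx = (((idx.toNat - 1 : Nat) + 1 : Nat) : Int) by omega,
         PySem.List.slice_to_natCast] at hmem
  · rintro ⟨k, hk, hmem⟩
    refine ⟨((k : Int) + 1), ?_, ?_⟩
    · rw [PySem.List.mem_pyRange_one]; constructor <;> [omega; (push_cast; omega)]
    · rwa [show ((k : Int) + 1) = (((k + 1 : Nat)) : Int) by push_cast; ring,
           PySem.List.slice_to_natCast]

-- the heart: A's per-hint condition equals B's
theorem cond_eq (h : String) (repo : List String) :
    aInner ((PySem.Str.split? h ".").getD []) repo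
        (PySem.List.pyRange 1 (((((PySem.Str.split? h ".").getD []).length : Int)) + 1) 1)
      = repo.any (fun p => bBoundary h p) := by
  rw [Bool.eq_iff_iff, acond_iff]
  simp only [List.any_eq_true]
  set S := h.toList.splitOn '.' with hS
  have hSne : S ≠ [] := List.splitOnP_ne_nil _ _
  have hHrec : ['.'].intercalate S = h.toList := List.intercalate_splitOn h.toList '.'
  have key := keyChars S hSne (splitOn_no_dot h.toList)
  have hjoin : ∀ k, (PySem.Str.join "." ((((PySem.Str.split? h ".").getD []).take (k+1)))).toList
      = ['.'].intercalate (S.take (k+1)) := by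
    intro k
    rw [parts_eq, PySem.Str.toList_join, ← List.map_take, List.map_map]
    have : String.toList ∘ String.ofList = id := by
      funext l; simp
    rw [this, List.map_id]
    rfl
  have hlen : ((PySem.Str.split? h ".").getD []).length = S.length := by
    rw [parts_eq, List.length_map, ← hS]
  constructor
  · rintro ⟨k, hk, hmem⟩
    refine ⟨PySem.Str.join "." ((((PySem.Str.split? h ".").getD []).take (k+1))), hmem, ?_⟩
    rw [boundary_iff, ← hHrec]
    exact (key _).mp ⟨k, by omega, hjoin k⟩
  · rintro ⟨p, hp, hbd⟩
    rw [boundary_iff, ← hHrec] at hbd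
    obtain ⟨k, hk, hkq⟩ := (key _).mpr hbd
    refine ⟨k, by omega, ?_⟩
    have hstr : PySem.Str.join "." ((((PySem.Str.split? h ".").getD []).take (k+1))) = p :=
      String.toList_inj.mp (by rw [hjoin k, ← hkq])
    rw [hstr]
    exact hp

-- ===== VERDICT (by name: the statement is the Claim_ definition above) =====
theorem repo_hint_overlap_py_spec : Claim_equal_repo_hint_overlap_py := by
  intro hints repo _
  unfold Spec_repo_hint_overlap_py repo_hint_overlap_py repo_hint_overlap_py_alt
  show PySem.List.sorted _ _ _ = PySem.List.sorted _ _ _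
  refine congrArg (fun l => PySem.List.sorted l (fun x : String => x) false) ?_
  apply PySem.List.foldl_congr_mem
  intro acc hint _
  by_cases hs : PySem.Str.strip hint = ""
  · simp [hs]
  · simp only [hs, if_false]
    rw [cond_eq (PySem.Str.strip hint) repo]
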